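-- pv_equiv track=rewrite | github.com/nyucel/blm2010 | vize/180401076.py | olustur_matris
-- ===== SOURCE A (Python) =====
-- def x_hesapla(genislik):
--     xKareToplam=[]
--     xKareToplam.append(genislik)
--     for j in range(1,13):
--         deger=0
--         for i in range(genislik):
--             deger += (i + 1) ** j
--         xKareToplam.append(deger)
--     return xKareToplam
--
-- def x_y_hesapla(genislik,list1):
--     xi_yi_toplam = []
--     xi_yi_toplam.append(sum(list1))
--     for i in range(1, 7, 1):
--         deger=0
--         for j in range(genislik):
--             deger += (j + 1) ** i * list1[j]
--         xi_yi_toplam.append(deger)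
--     return xi_yi_toplam
--
-- def olustur_matris(genislik,list1,z):
--     x,y=x_hesapla(genislik),x_y_hesapla(genislik,list1)
--     matris,satir=[],0
--     for i in range(0,z):
--         ekleneceksatir=[]
--         for i in range(satir,z+satir):
--             ekleneceksatir.append(x[i])
--         ekleneceksatir.append(y[satir])
--         satir+=1
--         matris.append(ekleneceksatir)
--     return matris
-- ===== SOURCE B (Python) =====
-- def olustur_matris(genislik, list1, z):
--     xs = [genislik] + [0] * 12
--     ys = [sum(list1)] + [0] * 6
--     for j in range(genislik):
--         v = list1[j]
--         p = 1
--         for d in range(1, 13):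
--             p *= j + 1
--             xs[d] += p
--             if d < 7:
--                 ys[d] += p * v
--     return [xs[i:i + z] + [ys[i]] for i in range(z)]
-- ===== Notes on version B (the rewrite author's own statement) =====
-- stated objective: alternative
-- what changed: A makes 18 separate per-degree passes over range(genislik), each recomputing (i+1)**j with pow, and assembles rows with an index-by-index append loop; B makes ONE sweep over the data maintaining an incremental power p (12 multiplications per sample) to fill all 13 x-slots and 6 y-slots at once, then assembles each row by list slicing.
import Mathlib
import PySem

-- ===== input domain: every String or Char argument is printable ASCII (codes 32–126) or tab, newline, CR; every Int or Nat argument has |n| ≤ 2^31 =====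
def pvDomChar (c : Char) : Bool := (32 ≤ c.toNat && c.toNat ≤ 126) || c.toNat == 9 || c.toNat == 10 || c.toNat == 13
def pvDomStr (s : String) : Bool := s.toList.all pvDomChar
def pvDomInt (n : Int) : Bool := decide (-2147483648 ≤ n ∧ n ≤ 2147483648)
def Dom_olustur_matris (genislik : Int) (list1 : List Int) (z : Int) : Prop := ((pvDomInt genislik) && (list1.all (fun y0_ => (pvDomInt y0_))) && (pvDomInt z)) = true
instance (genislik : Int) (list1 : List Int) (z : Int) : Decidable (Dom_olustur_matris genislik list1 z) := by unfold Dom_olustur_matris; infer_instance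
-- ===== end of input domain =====

-- B replaces A's 18 separate per-degree passes (each recomputing (i+1)**j with pow) by ONE sweep
-- over the data that maintains an incremental power, then assembles the rows by slicing.

-- ===== PORT A =====
def x_hesapla (genislik : Int) : List Int :=
  (PySem.List.pyRange 1 13 1).foldl (fun xKareToplam j =>
    xKareToplam ++ [(PySem.List.pyRange 0 genislik 1).foldl
      (fun deger i => deger + (i + 1) ^ j.toNat) 0]) [genislik]

def x_y_hesapla (genislik : Int) (list1 : List Int) : List Int :=
  (PySem.List.pyRange 1 7 1).foldl (fun xi_yi_toplam i =>
    xi_yi_toplam ++ [(PySem.List.pyRange 0 genislik 1).foldl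
      (fun deger j => deger + (j + 1) ^ i.toNat * ((PySem.List.pyGet? list1 j).getD 0)) 0]) [list1.sum]

def olustur_matris (genislik : Int) (list1 : List Int) (z : Int) : List (List Int) :=
  let x := x_hesapla genislik
  let y := x_y_hesapla genislik list1
  ((PySem.List.pyRange 0 z 1).foldl (fun (st : List (List Int) × Int) _i =>
    let satir := st.2
    let ekleneceksatir := (PySem.List.pyRange satir (z + satir) 1).foldl
      (fun r i => r ++ [(PySem.List.pyGet? x i).getD 0]) []
    let ekleneceksatir := ekleneceksatir ++ [(PySem.List.pyGet? y satir).getD 0]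
    (st.1 ++ [ekleneceksatir], satir + 1)) ([], 0)).1

-- ===== PORT B =====
/-- the body of B's single data sweep: for sample j, add every incremental power of j+1
    into the x slots and, weighted by list1[j], into the y slots -/
def pvStep (list1 : List Int) (st : List Int × List Int) (j : Int) : List Int × List Int :=
  let v := (PySem.List.pyGet? list1 j).getD 0
  let q := (PySem.List.pyRange 1 13 1).foldl (fun (q : Int × List Int × List Int) d =>
    let p := q.1 * (j + 1)
    let xs := q.2.1.set d.toNat ((q.2.1.getD d.toNat 0) + p)
    let ys := if d < 7 then q.2.2.set d.toNat ((q.2.2.getD d.toNat 0) + p * v) else q.2.2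
    (p, xs, ys)) (1, st.1, st.2)
  (q.2.1, q.2.2)

def olustur_matris_alt (genislik : Int) (list1 : List Int) (z : Int) : List (List Int) :=
  let xs0 : List Int := [genislik] ++ List.replicate 12 0
  let ys0 : List Int := [list1.sum] ++ List.replicate 6 0
  let st := (PySem.List.pyRange 0 genislik 1).foldl (pvStep list1) (xs0, ys0)
  (PySem.List.pyRange 0 z 1).map (fun i =>
    PySem.List.slice st.1 (some i) (some (i + z)) ++ [(PySem.List.pyGet? st.2 i).getD 0])

-- ===== PRECONDITION & SPEC =====
-- Pre_ excludes exactly the inputs where the Python A raises an IndexError: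
-- genislik > len(list1) (x_y_hesapla reads list1[j]) or z > 7 (the assembly reads past x/y).
def Pre_olustur_matris (genislik : Int) (list1 : List Int) (z : Int) : Prop :=
  genislik ≤ (list1.length : Int) ∧ z ≤ 7
instance (genislik : Int) (list1 : List Int) (z : Int) : Decidable (Pre_olustur_matris genislik list1 z) := by unfold Pre_olustur_matris; infer_instance

def pvWitness_olustur_matris : Int × List Int × Int := (2, ([3, 4], 2))

def Spec_olustur_matris (genislik : Int) (list1 : List Int) (z : Int) (out : List (List Int)) : Prop := out = olustur_matris_alt genislik list1 z
instance (genislik : Int) (list1 : List Int) (z : Int) (out : List (List Int)) : Decidable (Spec_olustur_matris genislik list1 z out) := by unfold Spec_olustur_matris; infer_instance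

-- ===== CLAIM (what is proved, stated in full; the proofs are below) =====
def Claim_equal_olustur_matris : Prop := ∀ (genislik : Int) (list1 : List Int) (z : Int), Dom_olustur_matris genislik list1 z → Pre_olustur_matris genislik list1 z → Spec_olustur_matris genislik list1 z (olustur_matris genislik list1 z)

-- ===== LEMMAS AND PROOFS =====

/-- the degree-`d` power sum over a list of sample indices, as A's inner loop computes it -/
def pvS (d : Nat) (L : List Int) : Int := L.foldl (fun deger i => deger + (i + 1) ^ d) 0

/-- the degree-`d` weighted power sum, as A's inner loop computes it -/
def pvT (list1 : List Int) (d : Nat) (L : List Int) : Int :=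
  L.foldl (fun deger j => deger + (j + 1) ^ d * ((PySem.List.pyGet? list1 j).getD 0)) 0

lemma pvS_nil (d : Nat) : pvS d [] = 0 := rfl
lemma pvT_nil (list1 : List Int) (d : Nat) : pvT list1 d [] = 0 := rfl

lemma pvS_cons (d : Nat) (a : Int) (L : List Int) :
    pvS d (a :: L) = (a + 1) ^ d + pvS d L := by
  simp only [pvS, List.foldl_cons, PySem.List.foldl_add, zero_add]

lemma pvT_cons (list1 : List Int) (d : Nat) (a : Int) (L : List Int) :
    pvT list1 d (a :: L) = (a + 1) ^ d * ((PySem.List.pyGet? list1 a).getD 0) + pvT list1 d L := by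
  simp only [pvT, List.foldl_cons, PySem.List.foldl_add, zero_add]

/-- characterisation of A's x_hesapla -/
lemma xA_char (g : Int) :
    x_hesapla g = [g, pvS 1 (PySem.List.pyRange 0 g 1), pvS 2 (PySem.List.pyRange 0 g 1),
      pvS 3 (PySem.List.pyRange 0 g 1), pvS 4 (PySem.List.pyRange 0 g 1), pvS 5 (PySem.List.pyRange 0 g 1),
      pvS 6 (PySem.List.pyRange 0 g 1), pvS 7 (PySem.List.pyRange 0 g 1), pvS 8 (PySem.List.pyRange 0 g 1),
      pvS 9 (PySem.List.pyRange 0 g 1), pvS 10 (PySem.List.pyRange 0 g 1), pvS 11 (PySem.List.pyRange 0 g 1),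
      pvS 12 (PySem.List.pyRange 0 g 1)] := by
  have h : PySem.List.pyRange 1 13 1 = [1,2,3,4,5,6,7,8,9,10,11,12] := by decide
  simp [x_hesapla, h, pvS]

/-- characterisation of A's x_y_hesapla -/
lemma yA_char (g : Int) (l : List Int) :
    x_y_hesapla g l = [l.sum, pvT l 1 (PySem.List.pyRange 0 g 1), pvT l 2 (PySem.List.pyRange 0 g 1),
      pvT l 3 (PySem.List.pyRange 0 g 1), pvT l 4 (PySem.List.pyRange 0 g 1),
      pvT l 5 (PySem.List.pyRange 0 g 1), pvT l 6 (PySem.List.pyRange 0 g 1)] := by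
  have h : PySem.List.pyRange 1 7 1 = [1,2,3,4,5,6] := by decide
  simp [x_y_hesapla, h, pvT]

/-- one step of B's sweep, written out slot by slot -/
lemma step_char (l : List Int) (a g c1 c2 c3 c4 c5 c6 c7 c8 c9 c10 c11 c12 t0 t1 t2 t3 t4 t5 t6 : Int) :
    pvStep l ([g, c1, c2, c3, c4, c5, c6, c7, c8, c9, c10, c11, c12],
              [t0, t1, t2, t3, t4, t5, t6]) a =
    ([g,
     c1 + (1 * (a + 1)),
     c2 + (1 * (a + 1) * (a + 1)),
     c3 + (1 * (a + 1) * (a + 1) * (a + 1)),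
     c4 + (1 * (a + 1) * (a + 1) * (a + 1) * (a + 1)),
     c5 + (1 * (a + 1) * (a + 1) * (a + 1) * (a + 1) * (a + 1)),
     c6 + (1 * (a + 1) * (a + 1) * (a + 1) * (a + 1) * (a + 1) * (a + 1)),
     c7 + (1 * (a + 1) * (a + 1) * (a + 1) * (a + 1) * (a + 1) * (a + 1) * (a + 1)),
     c8 + (1 * (a + 1) * (a + 1) * (a + 1) * (a + 1) * (a + 1) * (a + 1) * (a + 1) * (a + 1)),
     c9 + (1 * (a + 1) * (a + 1) * (a + 1) * (a + 1) * (a + 1) * (a + 1) * (a + 1) * (a + 1) * (a + 1)),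
     c10 + (1 * (a + 1) * (a + 1) * (a + 1) * (a + 1) * (a + 1) * (a + 1) * (a + 1) * (a + 1) * (a + 1) * (a + 1)),
     c11 + (1 * (a + 1) * (a + 1) * (a + 1) * (a + 1) * (a + 1) * (a + 1) * (a + 1) * (a + 1) * (a + 1) * (a + 1) * (a + 1)),
     c12 + (1 * (a + 1) * (a + 1) * (a + 1) * (a + 1) * (a + 1) * (a + 1) * (a + 1) * (a + 1) * (a + 1) * (a + 1) * (a + 1) * (a + 1))],
    [t0,
     t1 + (1 * (a + 1)) * ((PySem.List.pyGet? l a).getD 0),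
     t2 + (1 * (a + 1) * (a + 1)) * ((PySem.List.pyGet? l a).getD 0),
     t3 + (1 * (a + 1) * (a + 1) * (a + 1)) * ((PySem.List.pyGet? l a).getD 0),
     t4 + (1 * (a + 1) * (a + 1) * (a + 1) * (a + 1)) * ((PySem.List.pyGet? l a).getD 0),
     t5 + (1 * (a + 1) * (a + 1) * (a + 1) * (a + 1) * (a + 1)) * ((PySem.List.pyGet? l a).getD 0),
     t6 + (1 * (a + 1) * (a + 1) * (a + 1) * (a + 1) * (a + 1) * (a + 1)) * ((PySem.List.pyGet? l a).getD 0)]) := rfl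

/-- B's sweep, characterised: each slot accumulates its power sum. -/
lemma bloop_char (l : List Int) : ∀ (L : List Int)
    (g c1 c2 c3 c4 c5 c6 c7 c8 c9 c10 c11 c12 t0 t1 t2 t3 t4 t5 t6 : Int),
    L.foldl (pvStep l)
      ([g, c1, c2, c3, c4, c5, c6, c7, c8, c9, c10, c11, c12], [t0, t1, t2, t3, t4, t5, t6])
    = ([g, c1 + pvS 1 L, c2 + pvS 2 L, c3 + pvS 3 L, c4 + pvS 4 L, c5 + pvS 5 L, c6 + pvS 6 L,
        c7 + pvS 7 L, c8 + pvS 8 L, c9 + pvS 9 L, c10 + pvS 10 L, c11 + pvS 11 L, c12 + pvS 12 L],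
       [t0, t1 + pvT l 1 L, t2 + pvT l 2 L, t3 + pvT l 3 L, t4 + pvT l 4 L, t5 + pvT l 5 L,
        t6 + pvT l 6 L]) := by
  intro L
  induction L with
  | nil => intro g c1 c2 c3 c4 c5 c6 c7 c8 c9 c10 c11 c12 t0 t1 t2 t3 t4 t5 t6
           simp [pvS_nil, pvT_nil]
  | cons a L ih =>
    intro g c1 c2 c3 c4 c5 c6 c7 c8 c9 c10 c11 c12 t0 t1 t2 t3 t4 t5 t6
    rw [List.foldl_cons, step_char, ih]
    simp only [pvS_cons, pvT_cons, Prod.mk.injEq, List.cons.injEq]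
    and_intros <;> first | trivial | ring

-- ===== VERDICT (by name: the statement is the Claim_ definition above) =====
theorem olustur_matris_spec : Claim_equal_olustur_matris := by
  intro g l z _hDom hPre
  unfold Spec_olustur_matris olustur_matris olustur_matris_alt
  rw [xA_char, yA_char]
  simp only [List.replicate, List.cons_append, List.nil_append]
  rw [bloop_char]
  simp only [zero_add]
  obtain ⟨_, hz⟩ := hPre
  by_cases hz0 : z ≤ 0
  · rw [show PySem.List.pyRange 0 z 1 = [] from PySem.List.pyRange_one_eq_nil hz0]; rfl
  · interval_cases z <;> rfl
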